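-- pv_equiv track=rewrite | github.com/tomasnyberg/cp_notebook | codeforces/858/C.py | check_good
-- ===== SOURCE A (Python) =====
-- import itertools
--
-- def check_good(xs):
--     m = len(xs) // 2
--     # Get every subsequence of length m, and all the elements that are not in that subsequence in two different arrays
--     combos = [1]*m + [0]*m
--     for combo in itertools.permutations(combos, 2*m):
--         a = [x for x, c in zip(xs, combo) if c == 1]
--         b = [x for x, c in zip(xs, combo) if c == 0]
--         prod = 1
--         for x in a:
--             prod *= x
--         if prod != sum(b):
--             return False
--     return True
-- ===== SOURCE B (Python) =====
-- def check_good(xs):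
--     m = len(xs) // 2
--
--     # Explicit-stack DFS over the distinct 0/1 splits: at position i the element
--     # xs[i] goes either to the sum side (`zeros` left, tried first) or to the
--     # product side (`ones` left); each frame carries the running product and
--     # running total, and the first failing split returns False immediately.
--     stack = [(0, m, m, 1, 0)]
--     while stack:
--         i, ones, zeros, prod, total = stack.pop()
--         if ones == 0 and zeros == 0:
--             if prod != total:
--                 return False
--         elif ones == 0:
--             stack.append((i + 1, 0, zeros - 1, prod, total + xs[i]))
--         elif zeros == 0:
--             stack.append((i + 1, ones - 1, 0, prod * xs[i], total))
--         else:
--             stack.append((i + 1, ones - 1, zeros, prod * xs[i], total))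
--             stack.append((i + 1, ones, zeros - 1, prod, total + xs[i]))
--     return True
-- ===== Notes on version B (the rewrite author's own statement) =====
-- stated objective: alternative
-- what changed: B replaces A's walk over every permutation of the multiset of m ones and m zeros (rebuilding two filtered lists per permutation) by an explicit-stack DFS that visits each distinct product/sum split once, carrying a running product and running total; exhaustive-case work drops from (2m)! to C(2m,m) checks, though on the timed early-exit inputs both stop after the first split, so no measured speed is claimed.
import Mathlib
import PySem

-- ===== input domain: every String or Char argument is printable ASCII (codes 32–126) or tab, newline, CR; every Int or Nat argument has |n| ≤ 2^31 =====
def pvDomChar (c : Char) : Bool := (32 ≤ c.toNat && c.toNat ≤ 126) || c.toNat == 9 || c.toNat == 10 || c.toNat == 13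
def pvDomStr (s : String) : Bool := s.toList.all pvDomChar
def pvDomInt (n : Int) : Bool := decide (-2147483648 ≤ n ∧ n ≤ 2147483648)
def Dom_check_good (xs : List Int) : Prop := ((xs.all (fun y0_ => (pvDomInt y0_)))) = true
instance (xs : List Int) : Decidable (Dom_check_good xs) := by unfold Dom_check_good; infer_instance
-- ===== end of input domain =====

-- B replaces A's walk over every permutation of the multiset of m ones and m zeros by a DFS that
-- visits each distinct product/sum split once, carrying running product and total.

-- ===== PORT A =====
-- A's loop body: a, b, prod, and the comparison `prod != sum(b)`
def stepA (xs : List Int) (combo : List Int) : Bool :=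
  let a := ((xs.zip combo).filter (fun p => p.2 == 1)).map Prod.fst
  let b := ((xs.zip combo).filter (fun p => p.2 == 0)).map Prod.fst
  let prod := a.foldl (· * ·) 1
  decide (prod = b.sum)

-- A's `for combo in itertools.permutations(l, len(l)): if <body fails>: return False`:
-- the permutation generator picks an index, prepends that element and recurses on the
-- remaining pool (itertools' order); like the lazy Python generator plus early return,
-- it short-circuits via `List.all` (&&) instead of materializing the stream.
-- fuel = l.length; acc is the reversed prefix of the tuple being generated.
def goA (xs : List Int) (fuel : Nat) (acc : List Int) (l : List Int) : Bool :=
  match fuel with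
  | 0 => stepA xs acc.reverse
  | fuel + 1 =>
    (List.range l.length).all fun i => goA xs fuel (l.getD i 0 :: acc) (l.eraseIdx i)

def check_good (xs : List Int) : Bool :=
  let m := xs.length / 2
  let combos := List.replicate m (1 : Int) ++ List.replicate m (0 : Int)
  goA xs (2 * m) [] combos

-- ===== PORT B =====
-- Source B's while-loop over the explicit DFS stack; each branch is one arm of its
-- if/elif chain, with the two appends popped zeros-branch first (Python pops last-in).
-- (xs[i] is only read while ones+zeros > 0, where i < len(xs); getD's default is unreachable.)
def goStack (xs : List Int) : List (Nat × Nat × Nat × Int × Int) → Bool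
  | [] => true
  | (i, o, z, p, s) :: rest =>
    match o, z with
    | 0, 0 => if p ≠ s then false else goStack xs rest
    | 0, z + 1 => goStack xs ((i + 1, 0, z, p, s + xs.getD i 0) :: rest)
    | o + 1, 0 => goStack xs ((i + 1, o, 0, p * xs.getD i 0, s) :: rest)
    | o + 1, z + 1 =>
      goStack xs ((i + 1, o + 1, z, p, s + xs.getD i 0) ::
        (i + 1, o, z + 1, p * xs.getD i 0, s) :: rest)
termination_by st => (st.map (fun f => 3 ^ (f.2.1 + f.2.2.1))).sum
decreasing_by
  · simp only [List.map_cons, List.sum_cons]; omega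
  · simp only [List.map_cons, List.sum_cons, Nat.succ_eq_add_one]
    have h1 : 3 ^ (0 + (z + 1)) = 3 * 3 ^ (0 + z) := by ring
    have h2 : 0 < 3 ^ (0 + z) := Nat.pow_pos (by omega)
    omega
  · simp only [List.map_cons, List.sum_cons, Nat.succ_eq_add_one]
    have h1 : 3 ^ (o + 1 + 0) = 3 * 3 ^ (o + 0) := by ring
    have h2 : 0 < 3 ^ (o + 0) := Nat.pow_pos (by omega)
    omega
  · simp only [List.map_cons, List.sum_cons, Nat.succ_eq_add_one]
    have h1 : 3 ^ (o + 1 + (z + 1)) = 3 * 3 ^ (o + (z + 1)) := by ring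
    have h3 : 3 ^ (o + 1 + z) = 3 ^ (o + (z + 1)) := by
      rw [show o + 1 + z = o + (z + 1) by omega]
    have h2 : 0 < 3 ^ (o + (z + 1)) := Nat.pow_pos (by omega)
    omega

def check_good_alt (xs : List Int) : Bool :=
  let m := xs.length / 2
  goStack xs [(0, m, m, 1, 0)]

-- ===== PRECONDITION & SPEC =====
def Spec_check_good (xs : List Int) (out : Bool) : Prop := out = check_good_alt xs
instance (xs : List Int) (out : Bool) : Decidable (Spec_check_good xs out) := by unfold Spec_check_good; infer_instance

-- ===== CLAIM (what is proved, stated in full; the proofs are below) =====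
def Claim_equal_check_good : Prop := ∀ (xs : List Int), Dom_check_good xs → Spec_check_good xs (check_good xs)

-- ===== LEMMAS AND PROOFS =====

-- proof-side eager version of A's permutation stream (itertools' order)
def pyPermsA (fuel : Nat) (l : List Int) : List (List Int) :=
  match fuel with
  | 0 => [[]]
  | fuel + 1 =>
    (List.range l.length).flatMap fun i =>
      (pyPermsA fuel (l.eraseIdx i)).map (fun t => l.getD i 0 :: t)

-- proof-side: the recursive form of B's DFS (one frame at a time)
def recB (xs : List Int) : Nat → Nat → Nat → Int → Int → Bool
  | _, 0, 0, prod, total => decide (prod = total)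
  | i, 0, z + 1, prod, total => recB xs (i + 1) 0 z prod (total + xs.getD i 0)
  | i, o + 1, 0, prod, total => recB xs (i + 1) o 0 (prod * xs.getD i 0) total
  | i, o + 1, z + 1, prod, total =>
    let ok := recB xs (i + 1) (o + 1) z prod (total + xs.getD i 0)
    if ok then recB xs (i + 1) o (z + 1) (prod * xs.getD i 0) total else ok
termination_by _ o z _ _ => o + z

-- the stack loop computes the conjunction of recB over its frames
theorem goStack_eq (xs : List Int) (st : List (Nat × Nat × Nat × Int × Int)) :
    goStack xs st = st.all (fun f => recB xs f.1 f.2.1 f.2.2.1 f.2.2.2.1 f.2.2.2.2) := by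
  fun_induction goStack xs st
  all_goals try rfl
  all_goals simp_all [recB, Bool.and_assoc]

-- proof-side: the distinct 0/1 masks with exactly `o` ones and `z` zeros
def masksB : Nat → Nat → List (List Int)
  | 0, z => [List.replicate z 0]
  | o + 1, 0 => [List.replicate (o + 1) 1]
  | o + 1, z + 1 =>
    ((masksB o (z + 1)).map (fun t => (1 : Int) :: t)) ++
      ((masksB (o + 1) z).map (fun t => (0 : Int) :: t))

-- proof-side: the per-mask check B's DFS performs, as one fold over the zipped suffix
def stepB (xs : List Int) (i : Nat) (p s : Int) (mask : List Int) : Bool :=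
  let pt := ((xs.drop i).zip mask).foldl
    (fun (pt : Int × Int) q => if q.2 ≠ 0 then (pt.1 * q.1, pt.2) else (pt.1, pt.2 + q.1))
    (p, s)
  decide (pt.1 = pt.2)

theorem goA_eq_all (xs : List Int) (fuel : Nat) : ∀ (acc l : List Int),
    goA xs fuel acc l = (pyPermsA fuel l).all (fun t => stepA xs (acc.reverse ++ t)) := by
  induction fuel with
  | zero => intro acc l; simp [goA, pyPermsA]
  | succ fuel ih =>
    intro acc l
    simp only [goA, pyPermsA, List.all_flatMap, List.all_map, ih, List.reverse_cons,
      List.append_assoc, List.cons_append, List.nil_append, Function.comp_def]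

theorem zip_drop_cons (xs : List Int) (i : Nat) (h : i < xs.length) (b : Int) (mask : List Int) :
    (xs.drop i).zip (b :: mask) = (xs.getD i 0, b) :: (xs.drop (i + 1)).zip mask := by
  rw [List.drop_eq_getElem_cons h, List.getD_eq_getElem xs 0 h]
  rfl

theorem masksB_zero_right (o : Nat) : masksB o 0 = [List.replicate o 1] := by
  cases o <;> simp [masksB]

theorem stepB_cons_one (xs : List Int) (i : Nat) (hi : i < xs.length) (p s : Int) (t : List Int) :
    stepB xs i p s (1 :: t) = stepB xs (i + 1) (p * xs.getD i 0) s t := by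
  unfold stepB
  rw [zip_drop_cons xs i hi, List.foldl_cons]
  norm_num

theorem stepB_cons_zero (xs : List Int) (i : Nat) (hi : i < xs.length) (p s : Int) (t : List Int) :
    stepB xs i p s (0 :: t) = stepB xs (i + 1) p (s + xs.getD i 0) t := by
  unfold stepB
  rw [zip_drop_cons xs i hi, List.foldl_cons]
  norm_num

-- B's DFS checks exactly the masks of masksB, each with one fused fold
theorem recB_eq_all (n : Nat) : ∀ o z, o + z ≤ n → ∀ (xs : List Int) (i : Nat) (p s : Int),
    i + o + z ≤ xs.length →
    recB xs i o z p s = (masksB o z).all (stepB xs i p s) := by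
  induction n with
  | zero =>
    intro o z h xs i p s _
    obtain rfl : o = 0 := by omega
    obtain rfl : z = 0 := by omega
    simp [recB, masksB, stepB]
  | succ n ih =>
    intro o z h xs i p s hlen
    match o, z with
    | 0, 0 => simp [recB, masksB, stepB]
    | 0, z + 1 =>
      have hi : i < xs.length := by omega
      rw [recB, ih 0 z (by omega) xs (i + 1) p (s + xs.getD i 0) (by omega)]
      simp only [masksB, List.all_cons, List.all_nil, Bool.and_true, List.replicate_succ,
        stepB_cons_zero xs i hi]
    | o + 1, 0 =>
      have hi : i < xs.length := by omega
      rw [recB, ih o 0 (by omega) xs (i + 1) (p * xs.getD i 0) s (by omega)]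
      simp only [masksB_zero_right, List.all_cons, List.all_nil, Bool.and_true,
        List.replicate_succ, stepB_cons_one xs i hi]
    | o + 1, z + 1 =>
      have hi : i < xs.length := by omega
      rw [recB,
        ih (o + 1) z (by omega) xs (i + 1) p (s + xs.getD i 0) (by omega),
        ih o (z + 1) (by omega) xs (i + 1) (p * xs.getD i 0) s (by omega)]
      simp only [masksB, List.all_append, List.all_map, Function.comp_def,
        stepB_cons_one xs i hi, stepB_cons_zero xs i hi]
      cases (masksB (o + 1) z).all (fun t => stepB xs (i + 1) p (s + xs.getD i 0) t) <;> simp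

-- foldl (·*·) with an arbitrary seed pulls the seed out
theorem foldl_mul_seed (l : List Int) : ∀ a : Int, l.foldl (· * ·) a = a * l.foldl (· * ·) 1 := by
  induction l with
  | nil => simp
  | cons x rest ih =>
    intro a
    simp only [List.foldl_cons]
    rw [ih (a * x), ih (1 * x)]
    ring

-- invariant of the fused fold
theorem foldB_spec (zs : List (Int × Int)) : ∀ p s : Int,
    zs.foldl (fun (pt : Int × Int) q => if q.2 ≠ 0 then (pt.1 * q.1, pt.2) else (pt.1, pt.2 + q.1)) (p, s)
      = (p * ((zs.filter (fun q => decide (q.2 ≠ 0))).map Prod.fst).foldl (· * ·) 1,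
         s + ((zs.filter (fun q => decide (q.2 = 0))).map Prod.fst).sum) := by
  induction zs with
  | nil => simp
  | cons q rest ih =>
    intro p s
    by_cases h : q.2 = 0
    · rw [List.foldl_cons, if_neg (not_not_intro h), ih]
      simp only [List.filter_cons, h, decide_true, if_true, List.map_cons, List.sum_cons]
      refine Prod.ext rfl ?_
      simp only
      ring
    · rw [List.foldl_cons, if_pos h, ih]
      simp only [List.filter_cons, decide_eq_true h, if_true, decide_eq_false h,
        List.map_cons, List.foldl_cons]
      refine Prod.ext ?_ rfl
      simp only
      rw [foldl_mul_seed _ (1 * q.1)]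
      ring

-- the two per-mask checks agree on 0/1 masks
theorem step_eq (xs : List Int) (c : List Int) (hc : ∀ v ∈ c, v = 0 ∨ v = 1) :
    stepA xs c = stepB xs 0 1 0 c := by
  unfold stepA stepB
  rw [List.drop_zero, foldB_spec]
  simp only [one_mul, zero_add]
  have h1 : (xs.zip c).filter (fun p => p.2 == 1) = (xs.zip c).filter (fun q => decide (q.2 ≠ 0)) := by
    apply List.filter_congr
    intro q hq
    rcases hc q.2 (List.of_mem_zip hq).2 with h | h <;> simp [h]
  have h0 : (xs.zip c).filter (fun p => p.2 == 0) = (xs.zip c).filter (fun q => decide (q.2 = 0)) := by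
    apply List.filter_congr
    intro q hq
    rcases hc q.2 (List.of_mem_zip hq).2 with h | h <;> simp [h]
  rw [h1, h0]

-- l ~ l[i] :: l.eraseIdx i  (stated with getD, as the port uses it)
theorem perm_getD_eraseIdx (l : List Int) (i : Nat) (h : i < l.length) :
    l.Perm (l.getD i 0 :: l.eraseIdx i) := by
  have h1 : l.getD i 0 = l[i] := List.getD_eq_getElem l 0 h
  rw [h1]
  exact (List.perm_cons_erase (l.getElem_mem h)).trans ((List.erase_getElem h).cons _)

-- membership in the ported permutation stream ↔ permutation of the pool
theorem mem_pyPermsA (fuel : Nat) : ∀ (l : List Int), fuel = l.length →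
    ∀ c, c ∈ pyPermsA fuel l ↔ c.Perm l := by
  induction fuel with
  | zero =>
    intro l hl c
    have : l = [] := by cases l <;> simp_all
    subst this
    simp [pyPermsA, List.perm_nil]
  | succ fuel ih =>
    intro l hl c
    simp only [pyPermsA, List.mem_flatMap, List.mem_range, List.mem_map]
    constructor
    · rintro ⟨i, hi, t, ht, rfl⟩
      have hlen : fuel = (l.eraseIdx i).length := by
        have := List.length_eraseIdx_add_one (l := l) (i := i) hi; omega
      have ht' := (ih _ hlen t).mp ht
      exact ((ht'.cons _).trans (perm_getD_eraseIdx l i hi).symm)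
    · intro hperm
      have hcne : c ≠ [] := by
        intro h; subst h
        have := hperm.length_eq; simp at this; omega
      obtain ⟨y, t, rfl⟩ := List.exists_cons_of_ne_nil hcne
      obtain ⟨i, hi, hyi⟩ := List.getElem_of_mem (hperm.subset List.mem_cons_self)
      have hlen : fuel = (l.eraseIdx i).length := by
        have := List.length_eraseIdx_add_one (l := l) (i := i) hi; omega
      have hgd : l.getD i 0 = y := by rw [List.getD_eq_getElem l 0 hi, hyi]
      refine ⟨i, hi, t, ?_, by rw [hgd]⟩
      apply (ih _ hlen t).mpr
      have h2 : l.Perm (y :: l.eraseIdx i) := by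
        have := perm_getD_eraseIdx l i hi; rwa [hgd] at this
      exact (hperm.trans h2).cons_inv

-- membership in the mask list ↔ permutation of the multiset of o ones and z zeros
theorem mem_masksB_aux (n : Nat) : ∀ o z c, o + z ≤ n →
    (c ∈ masksB o z ↔ c.Perm (List.replicate o (1 : Int) ++ List.replicate z 0)) := by
  induction n with
  | zero =>
    intro o z c h
    obtain rfl : o = 0 := by omega
    obtain rfl : z = 0 := by omega
    simp [masksB, List.perm_nil]
  | succ n ih =>
    intro o z c h
    match o, z with
    | 0, z =>
      simp [masksB, List.perm_replicate]
    | o + 1, 0 =>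
      simp [masksB, List.perm_replicate]
    | o + 1, z + 1 =>
      simp only [masksB, List.mem_append, List.mem_map]
      constructor
      · rintro (⟨t, ht, rfl⟩ | ⟨t, ht, rfl⟩)
        · have := (ih o (z + 1) t (by omega)).mp ht
          rw [List.replicate_succ (n := o), List.cons_append]
          exact this.cons 1
        · have := (ih (o + 1) z t (by omega)).mp ht
          rw [List.replicate_succ (n := z)]
          exact ((this.cons 0).trans List.perm_middle.symm)
      · intro hperm
        have hcne : c ≠ [] := by
          intro hc; subst hc
          have := hperm.length_eq; simp at this
        obtain ⟨y, t, rfl⟩ := List.exists_cons_of_ne_nil hcne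
        have hy : y = 1 ∨ y = 0 := by
          have := hperm.subset List.mem_cons_self
          simp only [List.mem_append, List.mem_replicate] at this
          rcases this with ⟨_, h⟩ | ⟨_, h⟩
          · exact Or.inl h
          · exact Or.inr h
        rcases hy with rfl | rfl
        · left
          refine ⟨t, (ih o (z + 1) t (by omega)).mpr ?_, rfl⟩
          have h2 : ((1 : Int) :: t).Perm (1 :: (List.replicate o 1 ++ List.replicate (z + 1) 0)) := by
            have := hperm
            rwa [List.replicate_succ (n := o), List.cons_append] at this
          exact h2.cons_inv
        · right
          refine ⟨t, (ih (o + 1) z t (by omega)).mpr ?_, rfl⟩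
          have h2 : ((0 : Int) :: t).Perm (0 :: (List.replicate (o + 1) 1 ++ List.replicate z 0)) := by
            have := hperm
            rw [List.replicate_succ (n := z)] at this
            exact this.trans List.perm_middle
          exact h2.cons_inv

theorem all_congr_mem (l1 l2 : List (List Int)) (f g : List Int → Bool)
    (hmem : ∀ c, c ∈ l1 ↔ c ∈ l2) (hfg : ∀ c ∈ l1, f c = g c) : l1.all f = l2.all g := by
  rw [Bool.eq_iff_iff, List.all_eq_true, List.all_eq_true]
  constructor
  · intro h c hc
    rw [← hfg c ((hmem c).mpr hc)]; exact h c ((hmem c).mpr hc)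
  · intro h c hc
    rw [hfg c hc]; exact h c ((hmem c).mp hc)

-- ===== VERDICT (by name: the statement is the Claim_ definition above) =====
theorem check_good_spec : Claim_equal_check_good := by
  intro xs _
  unfold Spec_check_good check_good check_good_alt
  set m := xs.length / 2 with hm
  rw [goA_eq_all, goStack_eq]
  simp only [List.all_cons, List.all_nil, Bool.and_true, List.reverse_nil, List.nil_append]
  rw [recB_eq_all (m + m) m m (by omega) xs 0 1 0 (by omega)]
  have hlen : 2 * m = (List.replicate m (1 : Int) ++ List.replicate m (0 : Int)).length := by
    simp; omega
  apply all_congr_mem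
  · intro c
    rw [mem_pyPermsA _ _ hlen, mem_masksB_aux (m + m) m m c (by omega)]
  · intro c hc
    have hcperm := (mem_pyPermsA _ _ hlen c).mp hc
    apply step_eq
    intro v hv
    have := hcperm.subset hv
    simp only [List.mem_append, List.mem_replicate] at this
    rcases this with ⟨_, h⟩ | ⟨_, h⟩ <;> simp [h]
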